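-- pv_equiv track=rewrite | github.com/amirshams84/ATAC_SEQ | Snakemake/library/utility.py | build_snakemake_awk
-- ===== SOURCE A (Python) =====
-- def build_snakemake_awk(awk_String):
-- 	"""
-- 	"""
-- 	snakemake_awk_String = ""
-- 	dupliucate_string_List = ['\\', '{', '}']
-- 	escape_character_List = ['$', '"']
-- 	for each_letter in list(awk_String):
-- 		if each_letter not in dupliucate_string_List:
-- 			#
-- 			snakemake_awk_String += each_letter
-- 		elif each_letter in escape_character_List:
-- 			#
-- 			snakemake_awk_String += '\\' + each_letter
--
-- 		else:
-- 			snakemake_awk_String += each_letter * 2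
-- 	return snakemake_awk_String
-- ===== SOURCE B (Python) =====
-- def build_snakemake_awk(awk_String):
--     return awk_String.replace('\\', '\\\\').replace('{', '{{').replace('}', '}}')
-- ===== Notes on version B (the rewrite author's own statement) =====
-- stated objective: idiomatic
-- what changed: Replaced the explicit per-character loop (whose escape-character branch is dead) by three sequential str.replace passes, one per special character to double; the targets are disjoint so the passes are independent.
import Mathlib
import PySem

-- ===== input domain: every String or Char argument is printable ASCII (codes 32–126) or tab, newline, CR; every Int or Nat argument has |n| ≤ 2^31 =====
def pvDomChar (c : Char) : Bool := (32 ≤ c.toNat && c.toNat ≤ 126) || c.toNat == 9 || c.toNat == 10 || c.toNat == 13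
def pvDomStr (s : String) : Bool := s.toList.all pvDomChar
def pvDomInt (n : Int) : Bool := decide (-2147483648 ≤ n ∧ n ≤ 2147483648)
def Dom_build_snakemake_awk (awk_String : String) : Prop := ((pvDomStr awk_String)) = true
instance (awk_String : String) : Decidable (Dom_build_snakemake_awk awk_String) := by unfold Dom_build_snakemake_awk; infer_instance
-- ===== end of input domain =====

-- B replaces A's per-character loop (whose escape-character branch is dead) by three
-- sequential replace passes doubling '\', '{' and '}'; objective: idiomatic.

-- ===== PORT A =====
-- A: build the output character by character, appending the doubled character for
-- '\', '{', '}' (the escape branch for '$', '"' can never fire since those are not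
-- in the duplicate list) and the character itself otherwise.
def build_snakemake_awk (awk_String : String) : String :=
  let dupliucate_string_List : List Char := ['\\', '{', '}']
  let escape_character_List : List Char := ['$', '"']
  String.ofList <|
    awk_String.toList.foldl (fun snakemake_awk_String each_letter =>
      if each_letter ∉ dupliucate_string_List then
        snakemake_awk_String ++ [each_letter]
      else if each_letter ∈ escape_character_List then
        snakemake_awk_String ++ ['\\', each_letter]
      else
        snakemake_awk_String ++ [each_letter, each_letter]) []

-- ===== PORT B =====
def build_snakemake_awk_alt (awk_String : String) : String :=
  PySem.Str.replace (PySem.Str.replace (PySem.Str.replace awk_String "\\" "\\\\") "{" "{{") "}" "}}"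

-- ===== PRECONDITION & SPEC =====
def Spec_build_snakemake_awk (awk_String : String) (out : String) : Prop := out = build_snakemake_awk_alt awk_String
instance (awk_String : String) (out : String) : Decidable (Spec_build_snakemake_awk awk_String out) := by unfold Spec_build_snakemake_awk; infer_instance

-- ===== CLAIM (what is proved, stated in full; the proofs are below) =====
def Claim_equal_build_snakemake_awk : Prop := ∀ (awk_String : String), Dom_build_snakemake_awk awk_String → Spec_build_snakemake_awk awk_String (build_snakemake_awk awk_String)

-- ===== LEMMAS AND PROOFS =====

-- replace with a single-character target is a flatMap over the characters
theorem replace_go_single (o : Char) (new : List Char) :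
    ∀ (l : List Char) (fuel : Nat) (acc : List Char), l.length ≤ fuel →
      PySem.Chars.replace.go [o] new fuel l acc
        = acc.reverse ++ l.flatMap (fun c => if c = o then new else [c]) := by
  intro l
  induction l with
  | nil =>
      intro fuel acc _
      cases fuel <;> simp [PySem.Chars.replace.go]
  | cons c t ih =>
      intro fuel acc hle
      cases fuel with
      | zero => simp at hle
      | succ fuel =>
        rw [PySem.Chars.replace.go]
        by_cases hc : c = o
        · subst hc
          simp only [List.isPrefixOf, List.flatMap_cons]
          rw [if_pos (by simp)]
          simp only [List.length_cons, List.length_nil, List.drop_succ_cons, List.drop_zero]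
          rw [ih fuel _ (by simpa using hle)]
          simp
        · simp only [List.isPrefixOf, List.flatMap_cons]
          rw [if_neg (by simp [beq_iff_eq]; exact fun h => hc h.symm),
              ih fuel _ (by simpa using hle)]
          simp [hc]

theorem replace_single (o : Char) (new : List Char) (l : List Char) :
    PySem.Chars.replace l [o] new = l.flatMap (fun c => if c = o then new else [c]) := by
  rw [PySem.Chars.replace, if_neg (by simp)]
  simpa using replace_go_single o new l l.length [] (le_refl _)

-- A's loop appends per character; it is the flatMap of its per-character output
theorem foldlA_eq_flatMap (f : Char → List Char) :
    ∀ (l acc : List Char), l.foldl (fun a c => a ++ f c) acc = acc ++ l.flatMap f := by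
  intro l
  induction l with
  | nil => simp
  | cons c t ih => intro acc; simp [ih]

-- the two per-character outputs coincide
theorem per_char_eq (c : Char) :
    (if c ∉ (['\\', '{', '}'] : List Char) then [c]
     else if c ∈ (['$', '"'] : List Char) then ['\\', c]
     else [c, c])
    = (if c = '\\' then ['\\', '\\'] else [c]).flatMap
        (fun b => (if b = '{' then ['{', '{'] else [b]).flatMap
          (fun d => if d = '}' then ['}', '}'] else [d])) := by
  by_cases h1 : c = '\\'
  · subst h1; decide
  by_cases h2 : c = '{'
  · subst h2; decide
  by_cases h3 : c = '}'
  · subst h3; decide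
  simp [h1, h2, h3]

-- ===== VERDICT (by name: the statement is the Claim_ definition above) =====
theorem build_snakemake_awk_spec : Claim_equal_build_snakemake_awk := by
  unfold Claim_equal_build_snakemake_awk
  intro s _
  unfold Spec_build_snakemake_awk build_snakemake_awk build_snakemake_awk_alt
  have hB : (PySem.Str.replace (PySem.Str.replace (PySem.Str.replace s "\\" "\\\\") "{" "{{") "}" "}}").toList
      = ((s.toList.flatMap (fun c => if c = '\\' then ['\\', '\\'] else [c])).flatMap
          (fun c => if c = '{' then ['{', '{'] else [c])).flatMap
          (fun c => if c = '}' then ['}', '}'] else [c]) := by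
    simp [PySem.Str.toList_replace, replace_single]
  have hA : (s.toList.foldl (fun a c =>
        if c ∉ (['\\', '{', '}'] : List Char) then a ++ [c]
        else if c ∈ (['$', '"'] : List Char) then a ++ ['\\', c]
        else a ++ [c, c]) [])
      = s.toList.flatMap (fun c =>
        if c ∉ (['\\', '{', '}'] : List Char) then [c]
        else if c ∈ (['$', '"'] : List Char) then ['\\', c]
        else [c, c]) := by
    have hfun : (fun (a : List Char) (c : Char) =>
        if c ∉ (['\\', '{', '}'] : List Char) then a ++ [c]
        else if c ∈ (['$', '"'] : List Char) then a ++ ['\\', c]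
        else a ++ [c, c])
      = fun (a : List Char) (c : Char) => a ++ (
        if c ∉ (['\\', '{', '}'] : List Char) then [c]
        else if c ∈ (['$', '"'] : List Char) then ['\\', c]
        else [c, c]) := by
      funext a c; split_ifs <;> rfl
    rw [hfun]
    simpa using foldlA_eq_flatMap (fun c =>
        if c ∉ (['\\', '{', '}'] : List Char) then [c]
        else if c ∈ (['$', '"'] : List Char) then ['\\', c]
        else [c, c]) s.toList []
  calc String.ofList _ = String.ofList ((PySem.Str.replace (PySem.Str.replace (PySem.Str.replace s "\\" "\\\\") "{" "{{") "}" "}}").toList) := by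
        refine congrArg String.ofList ?_
        rw [hA, hB]
        simp only [List.flatMap_assoc]
        exact List.flatMap_congr (fun c _ => per_char_eq c)
    _ = _ := String.ofList_toList
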